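-- pv_equiv track=rewrite | github.com/981377660LMT/algorithm-study | 7_graph/dfs/yield与返回bool的dfs.py | smallestBeautifulString2
-- ===== SOURCE A (Python) =====
-- def smallestBeautifulString2(s: str, k: int) -> str:
--     """
--     !返回bool的dfs返回路径.
--     """
--
--     def dfs(pos: int, isLimit: bool, pre1: int, pre2: int) -> bool:
--         if pos == n:
--             if not isLimit:
--                 return True
--             return False
--         lower = ords[pos] if isLimit else 97
--         for cur in range(lower, 97 + k):
--             if cur == pre1 or cur == pre2:
--                 continue
--             path.append(cur)
--             if dfs(pos + 1, (isLimit and cur == lower), cur, pre1):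
--                 return True  # !找到一条路径就返回
--             path.pop()
--         return False
--
--     path = []
--     n = len(s)
--     ords = list(map(ord, s))
--     dfs(0, True, 0, -1)
--     return "".join([chr(v) for v in path])
-- ===== SOURCE B (Python) =====
-- def smallestBeautifulString2(s: str, k: int) -> str:
--     """Greedy: scan the valid limit prefix, then from the rightmost raisable
--     position pick the smallest raise char and fill the suffix greedily."""
--     n = len(s)
--     ords = [ord(c) for c in s]
--     bound = 97 + k
--
--     def prevs(i):
--         if i == 0:
--             return 0, -1
--         if i == 1:
--             return ords[0], 0
--         return ords[i - 1], ords[i - 2]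
--
--     def fill(length, p1, p2):
--         # smallest char in [97, bound) avoiding the previous two, repeatedly
--         out = []
--         for _ in range(length):
--             c = 97
--             if c == p1 or c == p2:
--                 c += 1
--             if c == p1 or c == p2:
--                 c += 1
--             if c >= bound:
--                 return None
--             out.append(c)
--             p1, p2 = c, p1
--         return out
--
--     def try_raise(i):
--         p1, p2 = prevs(i)
--         c = ords[i] + 1
--         while c < bound:
--             if c != p1 and c != p2:
--                 suf = fill(n - 1 - i, c, p1)
--                 if suf is not None:
--                     return [c] + suf
--             c += 1
--         return None
--
--     # m = length of the longest prefix of s the search can keep verbatim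
--     m = 0
--     while m < n:
--         p1, p2 = prevs(m)
--         if ords[m] == p1 or ords[m] == p2 or ords[m] >= bound:
--             break
--         m += 1
--
--     i = min(m, n - 1)
--     while i >= 0:
--         tail = try_raise(i)
--         if tail is not None:
--             return s[:i] + "".join(map(chr, tail))
--         i -= 1
--     return ""
-- ===== Notes on version B (the rewrite author's own statement) =====
-- stated objective: alternative
-- what changed: Replaces A's recursive backtracking DFS (which threads a shared path list and returns a bool) by a direct greedy construction: compute the longest keepable prefix of s, then scan raise positions right-to-left, picking the smallest raise char whose suffix can be filled greedily with the smallest valid chars (no recursion, no backtracking).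
import Mathlib
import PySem

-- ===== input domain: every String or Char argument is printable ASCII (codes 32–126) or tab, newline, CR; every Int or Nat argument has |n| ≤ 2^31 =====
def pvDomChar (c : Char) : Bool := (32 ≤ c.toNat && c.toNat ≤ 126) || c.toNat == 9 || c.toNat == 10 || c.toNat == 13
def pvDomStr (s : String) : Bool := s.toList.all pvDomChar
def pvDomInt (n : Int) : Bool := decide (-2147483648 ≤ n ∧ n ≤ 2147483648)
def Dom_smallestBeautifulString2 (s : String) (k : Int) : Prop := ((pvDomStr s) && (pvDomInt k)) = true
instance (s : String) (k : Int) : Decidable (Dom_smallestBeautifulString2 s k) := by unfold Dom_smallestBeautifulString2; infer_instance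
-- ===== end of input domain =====

-- B replaces A's backtracking DFS by a direct greedy: longest keepable prefix, then the
-- rightmost raisable position with a greedy suffix fill (objective: alternative/simpler control flow).

-- ===== PORT A =====
-- the `for cur in range(lower, 97+k)` loop of dfs, as Python runs it: a counter `cur`
-- advanced with early exit (range() is lazy in Python 3); `recur` is dfs(pos+1, ...)
def pvGoA (recur : Bool → Int → Int → List Int → Bool × List Int)
    (lower pre1 pre2 : Int) (isLimit : Bool) (path : List Int) (b cur : Int) :
    Bool × List Int :=
  if _h : b ≤ cur then (false, path)
  else if cur = pre1 ∨ cur = pre2 then pvGoA recur lower pre1 pre2 isLimit path b (cur+1)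
  else
    let r := recur (isLimit && decide (cur = lower)) cur pre1 (path ++ [cur])
    if r.1 then r else pvGoA recur lower pre1 pre2 isLimit path b (cur+1)
termination_by (b - cur).toNat
decreasing_by all_goals omega

-- dfs(pos, isLimit, pre1, pre2); fuel = n - pos, so fuel = 0 ↔ pos == n; the mutable `path`
-- is threaded as state (append on entry, the old `path` is reused where Python pops).
-- ords[pos] is always in range when fuel > 0, so `getD` is exact here.
def pvDfsA (ords : List Int) (k : Int) : Nat → Nat → Bool → Int → Int → List Int → Bool × List Int
  | 0, _, isLimit, _, _, path => (!isLimit, path)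
  | fuel+1, pos, isLimit, pre1, pre2, path =>
    let lower : Int := if isLimit then ords.getD pos 0 else 97
    pvGoA (fun lim c q1 pa => pvDfsA ords k fuel (pos+1) lim c q1 pa)
      lower pre1 pre2 isLimit path (97 + k) lower

-- every value dfs appends is the code of a valid char (33 ≤ v ≤ 129), so Char.ofNat is exactly chr
def smallestBeautifulString2 (s : String) (k : Int) : String :=
  let ords : List Int := s.toList.map (fun c => (c.toNat : Int))
  let n := ords.length
  let res := pvDfsA ords k n 0 true 0 (-1) []
  String.mk (res.2.map (fun v => Char.ofNat v.toNat))

-- ===== PORT B =====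
def pvPrevs (ords : List Int) (i : Nat) : Int × Int :=
  if i = 0 then (0, -1)
  else if i = 1 then (ords.getD 0 0, 0)
  else (ords.getD (i-1) 0, ords.getD (i-2) 0)

-- the fill-step char choice: c = 97, bumped past p1/p2 (the two `if c == p1 or c == p2` lines)
def pvNext (p1 p2 : Int) : Int :=
  let c : Int := 97
  let c := if c = p1 ∨ c = p2 then c + 1 else c
  if c = p1 ∨ c = p2 then c + 1 else c

-- fill(length, p1, p2) with its `out` accumulator
def pvFill (bound : Int) (out : List Int) : Nat → Int → Int → Option (List Int)
  | 0, _, _ => some out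
  | len+1, p1, p2 =>
    let c := pvNext p1 p2
    if bound ≤ c then none
    else pvFill bound (out ++ [c]) len c p1

-- the `while c < bound` loop of try_raise; len = n - 1 - i
def pvTryRaiseLoop (bound : Int) (len : Nat) (p1 p2 : Int) (c : Int) : Option (List Int) :=
  if h : bound ≤ c then none
  else if c ≠ p1 ∧ c ≠ p2 then
    match pvFill bound [] len c p1 with
    | some suf => some (c :: suf)
    | none => pvTryRaiseLoop bound len p1 p2 (c+1)
  else pvTryRaiseLoop bound len p1 p2 (c+1)
termination_by (bound - c).toNat
decreasing_by all_goals omega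

-- the `while m < n` scan computing the longest keepable prefix; fuel = n
def pvValidM (ords : List Int) (bound : Int) (n : Nat) : Nat → Nat → Nat
  | 0, m => m
  | fuel+1, m =>
    if m < n then
      let p := pvPrevs ords m
      if ords.getD m 0 = p.1 ∨ ords.getD m 0 = p.2 ∨ bound ≤ ords.getD m 0 then m
      else pvValidM ords bound n fuel (m+1)
    else m

-- s[:i] + "".join(map(chr, tail)); all tail values are valid char codes, so Char.ofNat is exactly chr
def pvAnswer (s : String) (i : Nat) (tail : List Int) : String :=
  String.mk (s.toList.take i ++ tail.map (fun v => Char.ofNat v.toNat))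

-- try_raise(i) as an expression
def pvTryRaise (ords : List Int) (bound : Int) (n i : Nat) : Option (List Int) :=
  pvTryRaiseLoop bound (n-1-i) (pvPrevs ords i).1 (pvPrevs ords i).2 (ords.getD i 0 + 1)

-- the `while i >= 0` loop: i counts down, 0 is the last iteration
def pvOuter (s : String) (ords : List Int) (bound : Int) (n : Nat) : Nat → String
  | 0 =>
    match pvTryRaise ords bound n 0 with
    | some tail => pvAnswer s 0 tail
    | none => ""
  | i+1 =>
    match pvTryRaise ords bound n (i+1) with
    | some tail => pvAnswer s (i+1) tail
    | none => pvOuter s ords bound n i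

def smallestBeautifulString2_alt (s : String) (k : Int) : String :=
  let ords : List Int := s.toList.map (fun c => (c.toNat : Int))
  let n := ords.length
  let bound := 97 + k
  let m := pvValidM ords bound n n 0
  -- in Python the loop runs from min(m, n-1) down to 0; for n = 0 that start is -1 (no iteration)
  if n = 0 then "" else pvOuter s ords bound n (min m (n-1))

-- ===== PRECONDITION & SPEC =====
def Spec_smallestBeautifulString2 (s : String) (k : Int) (out : String) : Prop := out = smallestBeautifulString2_alt s k
instance (s : String) (k : Int) (out : String) : Decidable (Spec_smallestBeautifulString2 s k out) := by unfold Spec_smallestBeautifulString2; infer_instance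

-- ===== CLAIM (what is proved, stated in full; the proofs are below) =====
def Claim_equal_smallestBeautifulString2 : Prop := ∀ (s : String) (k : Int), Dom_smallestBeautifulString2 s k → Spec_smallestBeautifulString2 s k (smallestBeautifulString2 s k)

-- ===== LEMMAS AND PROOFS =====

-- smallest c ≥ 97 different from p1 and p2 (what both the fill step and the dfs scan land on)
def pvNc (p1 p2 : Int) : Int :=
  if 97 = p1 ∨ 97 = p2 then (if 98 = p1 ∨ 98 = p2 then 99 else 98) else 97

-- cons-shaped restatement of pvFill
def pvFillS (bound : Int) : Nat → Int → Int → Option (List Int)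
  | 0, _, _ => some []
  | len+1, p1, p2 =>
    let c := pvNc p1 p2
    if bound ≤ c then none
    else (pvFillS bound len c p1).map (c :: ·)

lemma pvNc_ge (p1 p2 : Int) : 97 ≤ pvNc p1 p2 ∧ pvNc p1 p2 ≤ 99 := by
  unfold pvNc; split_ifs <;> omega

lemma pvNc_not (p1 p2 : Int) : pvNc p1 p2 ≠ p1 ∧ pvNc p1 p2 ≠ p2 := by
  unfold pvNc; split_ifs with h1 h2
  · rcases h1 with h1 | h1 <;> rcases h2 with h2 | h2 <;> omega
  · rcases h1 with h1 | h1 <;> simp at h2 <;> omega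
  · simp at h1; omega

lemma pvNc_min (p1 p2 x : Int) (hx : 97 ≤ x) (h1 : x ≠ p1) (h2 : x ≠ p2) :
    pvNc p1 p2 ≤ x := by
  unfold pvNc; split_ifs with a b
  · rcases a with a | a <;> rcases b with b | b <;> omega
  · rcases a with a | a <;> omega
  · omega

lemma pvNext_eq (p1 p2 : Int) : pvNext p1 p2 = pvNc p1 p2 := by
  simp only [pvNext, pvNc]; split_ifs <;> omega

lemma pvFill_eq (bound : Int) : ∀ (len : Nat) (out : List Int) (p1 p2 : Int),
    pvFill bound out len p1 p2 = (pvFillS bound len p1 p2).map (out ++ ·) := by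
  intro len
  induction len with
  | zero => intro out p1 p2; simp [pvFill, pvFillS]
  | succ l ih =>
    intro out p1 p2
    simp only [pvFill, pvFillS, pvNext_eq]
    split_ifs with h
    · rfl
    · rw [ih]
      cases pvFillS bound l (pvNc p1 p2) p1 <;> simp

lemma pvFillS_big (bound : Int) (hb : 100 ≤ bound) :
    ∀ (len : Nat) (p1 p2 : Int), pvFillS bound len p1 p2 ≠ none := by
  intro len
  induction len with
  | zero => intro p1 p2; simp [pvFillS]
  | succ l ih =>
    intro p1 p2
    have h99 := pvNc_ge p1 p2
    simp only [pvFillS]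
    rw [if_neg (by omega)]
    simp only [ne_eq, Option.map_eq_none_iff]
    exact ih _ _

-- greedy-fill feasibility does not depend on which admissible first char was chosen
lemma pvFill_key (bound : Int) (len : Nat) (c c' p1 : Int)
    (hc : 97 ≤ c) (hcb : c < bound) (hcp : c ≠ p1)
    (hc' : 97 ≤ c') (hcb' : c' < bound) (hcp' : c' ≠ p1)
    (hnone : pvFillS bound len c p1 = none) : pvFillS bound len c' p1 = none := by
  by_cases h100 : 100 ≤ bound
  · exact absurd hnone (pvFillS_big bound h100 len c p1)
  by_cases h98 : bound ≤ 98
  · have : c = 97 ∧ c' = 97 := by omega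
    rw [this.2, ← this.1]; exact hnone
  -- bound = 99
  have hb : bound = 99 := by omega
  by_cases hcc : c = c'
  · rw [← hcc]; exact hnone
  have hcv : c = 97 ∨ c = 98 := by omega
  have hcv' : c' = 97 ∨ c' = 98 := by omega
  have hp1 : p1 ≠ 97 ∧ p1 ≠ 98 := by omega
  match len with
  | 0 => simp [pvFillS] at hnone
  | 1 =>
    exfalso
    rcases hcv with h | h <;>
      simp [pvFillS, pvNc, h, hp1.1.symm, hp1.2.symm, hb] at hnone
  | l+2 =>
    rcases hcv' with h | h <;>
      simp [pvFillS, pvNc, h, hp1.1.symm, hp1.2.symm, hb]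

lemma pvGoA_base (recur : Bool → Int → Int → List Int → Bool × List Int)
    (lower p1 p2 : Int) (lim : Bool) (path : List Int) (b cur : Int) (h : b ≤ cur) :
    pvGoA recur lower p1 p2 lim path b cur = (false, path) := by
  rw [pvGoA, dif_pos h]

lemma pvGoA_skip (recur : Bool → Int → Int → List Int → Bool × List Int)
    (lower p1 p2 : Int) (lim : Bool) (path : List Int) (b cur : Int)
    (h1 : cur < b) (h2 : cur = p1 ∨ cur = p2) :
    pvGoA recur lower p1 p2 lim path b cur = pvGoA recur lower p1 p2 lim path b (cur+1) := by
  rw [pvGoA, dif_neg (by omega), if_pos h2]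

lemma pvGoA_hit (recur : Bool → Int → Int → List Int → Bool × List Int)
    (lower p1 p2 : Int) (lim : Bool) (path : List Int) (b cur : Int)
    (h1 : cur < b) (h2 : ¬(cur = p1 ∨ cur = p2)) :
    pvGoA recur lower p1 p2 lim path b cur =
      (if (recur (lim && decide (cur = lower)) cur p1 (path ++ [cur])).1
       then recur (lim && decide (cur = lower)) cur p1 (path ++ [cur])
       else pvGoA recur lower p1 p2 lim path b (cur+1)) := by
  rw [pvGoA, dif_neg (by omega), if_neg h2]

lemma pvGoA_skip_to (recur : Bool → Int → Int → List Int → Bool × List Int)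
    (lower p1 p2 : Int) (lim : Bool) (path : List Int) (b a a' : Int)
    (h1 : a ≤ a') (h3 : a' ≤ b) (h2 : ∀ c, a ≤ c → c < a' → (c = p1 ∨ c = p2)) :
    pvGoA recur lower p1 p2 lim path b a = pvGoA recur lower p1 p2 lim path b a' := by
  rcases lt_or_eq_of_le h1 with hlt | rfl
  · rw [pvGoA_skip recur lower p1 p2 lim path b a (by omega) (h2 a le_rfl hlt)]
    exact pvGoA_skip_to recur lower p1 p2 lim path b (a+1) a' (by omega) h3
      (fun c hc1 hc2 => h2 c (by omega) hc2)
  · rfl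
termination_by (a' - a).toNat
decreasing_by all_goals omega

lemma pvGoA_fail (recur : Bool → Int → Int → List Int → Bool × List Int)
    (lower p1 p2 : Int) (lim : Bool) (path : List Int) (b a : Int)
    (h : ∀ c, a ≤ c → c < b → ¬(c = p1 ∨ c = p2) →
      (recur (lim && decide (c = lower)) c p1 (path ++ [c])).1 = false) :
    pvGoA recur lower p1 p2 lim path b a = (false, path) := by
  by_cases hab : b ≤ a
  · exact pvGoA_base recur lower p1 p2 lim path b a hab
  · push_neg at hab
    by_cases hskip : a = p1 ∨ a = p2
    · rw [pvGoA_skip recur lower p1 p2 lim path b a hab hskip]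
      exact pvGoA_fail recur lower p1 p2 lim path b (a+1)
        (fun c h1 h2 h3 => h c (by omega) h2 h3)
    · rw [pvGoA_hit recur lower p1 p2 lim path b a hab hskip, h a le_rfl hab hskip]
      simp only [Bool.false_eq_true, if_false]
      exact pvGoA_fail recur lower p1 p2 lim path b (a+1)
        (fun c h1 h2 h3 => h c (by omega) h2 h3)
termination_by (b - a).toNat
decreasing_by all_goals omega

-- A's dfs in non-limit mode is exactly the greedy fill
lemma pvDfs_nonlimit (ords : List Int) (k : Int) :
    ∀ (fuel : Nat) (pos : Nat) (p1 p2 : Int) (path : List Int),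
    pvDfsA ords k fuel pos false p1 p2 path =
      match pvFillS (97+k) fuel p1 p2 with
      | some l => (true, path ++ l)
      | none => (false, path) := by
  intro fuel
  induction fuel with
  | zero => intro pos p1 p2 path; simp [pvDfsA, pvFillS]
  | succ f ih =>
    intro pos p1 p2 path
    simp only [pvDfsA]
    rw [if_neg (by simp : ¬(false = true))]
    have hnc := pvNc_ge p1 p2
    have hncn := pvNc_not p1 p2
    by_cases hb : 97 + k ≤ pvNc p1 p2
    · rw [pvGoA_fail]
      · simp only [pvFillS]
        rw [if_pos hb]
      · intro c h1 h2 h3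
        push_neg at h3
        exact absurd (pvNc_min p1 p2 c h1 h3.1 h3.2) (by omega)
    · push_neg at hb
      rw [pvGoA_skip_to _ _ _ _ _ _ _ 97 (pvNc p1 p2) (by omega) (by omega) ?side,
        pvGoA_hit _ _ _ _ _ _ _ _ hb (not_or.mpr ⟨hncn.1, hncn.2⟩)]
      case side =>
        intro c hc1 hc2
        by_contra hcon
        push_neg at hcon
        exact absurd (pvNc_min p1 p2 c hc1 hcon.1 hcon.2) (by omega)
      simp only [Bool.false_and, ih]
      cases hf : pvFillS (97+k) f (pvNc p1 p2) p1 with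
      | some l =>
        simp only [pvFillS, hf, if_neg (by omega : ¬(97 + k ≤ pvNc p1 p2)), Option.map_some]
        simp
      | none =>
        rw [if_neg (by simp)]
        rw [pvGoA_fail]
        · simp only [pvFillS, hf, if_neg (by omega : ¬(97 + k ≤ pvNc p1 p2)), Option.map_none]
        · intro c h1 h2 h3
          push_neg at h3
          simp only [Bool.false_and, ih]
          rw [pvFill_key (97+k) f (pvNc p1 p2) c p1 (by omega) hb hncn.1 (by omega) h2 h3.1 hf]

-- the raise scan of A (candidates above `lower`) is B's try_raise loop
lemma pvGoA_raise (ords : List Int) (k : Int) (fuel pos : Nat) (p1 p2 lower : Int)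
    (path : List Int) (a : Int) (ha : lower < a) :
    pvGoA (fun lim c q1 pa => pvDfsA ords k fuel (pos+1) lim c q1 pa)
        lower p1 p2 true path (97+k) a
    = match pvTryRaiseLoop (97+k) fuel p1 p2 a with
      | some t => (true, path ++ t)
      | none => (false, path) := by
  by_cases hab : 97 + k ≤ a
  · rw [pvGoA_base _ _ _ _ _ _ _ _ hab, pvTryRaiseLoop, dif_pos hab]
  · push_neg at hab
    rw [pvTryRaiseLoop, dif_neg (by omega)]
    by_cases hskip : a = p1 ∨ a = p2
    · rw [pvGoA_skip _ _ _ _ _ _ _ _ hab hskip, if_neg (by tauto)]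
      exact pvGoA_raise ords k fuel pos p1 p2 lower path (a+1) (by omega)
    · push_neg at hskip
      rw [pvGoA_hit _ _ _ _ _ _ _ _ hab (by tauto), if_pos hskip]
      rw [show (decide (a = lower)) = false from decide_eq_false (by omega)]
      simp only [Bool.and_false, pvDfs_nonlimit, pvFill_eq, List.nil_append]
      cases hf : pvFillS (97+k) fuel a p1 with
      | some suf => simp
      | none =>
        simp only [Option.map_none]
        exact pvGoA_raise ords k fuel pos p1 p2 lower path (a+1) (by omega)
termination_by (97 + k - a).toNat
decreasing_by all_goals omega

lemma pvPrevs_succ (ords : List Int) (i : Nat) :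
    pvPrevs ords (i+1) = (ords.getD i 0, (pvPrevs ords i).1) := by
  rcases i with _ | _ | j <;> simp [pvPrevs]

-- rightmost-first search: what A's dfs computes in limit mode
def pvFindR (ords : List Int) (bound : Int) (n : Nat) (i : Nat) : Option (List Int) :=
  if _h : i < n then
    match (if ords.getD i 0 ≠ (pvPrevs ords i).1 ∧ ords.getD i 0 ≠ (pvPrevs ords i).2 ∧
        ords.getD i 0 < bound then pvFindR ords bound n (i+1) else none) with
    | some t => some (ords.getD i 0 :: t)
    | none => pvTryRaise ords bound n i
  else none
termination_by n - i
decreasing_by omega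

def pvVstep (ords : List Int) (bound : Int) (i : Nat) : Prop :=
  ords.getD i 0 ≠ (pvPrevs ords i).1 ∧ ords.getD i 0 ≠ (pvPrevs ords i).2 ∧
    ords.getD i 0 < bound

lemma pvTryRaiseLoop_ge (bound : Int) (len : Nat) (p1 p2 c : Int) (h : bound ≤ c) :
    pvTryRaiseLoop bound len p1 p2 c = none := by
  rw [pvTryRaiseLoop, dif_pos h]

lemma pvDfs_limit (ords : List Int) (k : Int) (n : Nat) (i : Nat) (path : List Int)
    (hin : i ≤ n) :
    pvDfsA ords k (n - i) i true (pvPrevs ords i).1 (pvPrevs ords i).2 path =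
      match pvFindR ords (97+k) n i with
      | some t => (true, path ++ t)
      | none => (false, path) := by
  by_cases hi : i < n
  · have hsub : n - i = (n - (i+1)) + 1 := by omega
    rw [hsub]
    simp only [pvDfsA]
    rw [if_pos (trivial : True)]
    rw [pvFindR, dif_pos hi]
    set sp := ords.getD i 0 with hsp
    set p := pvPrevs ords i with hp
    by_cases hb : 97 + k ≤ sp
    · rw [pvGoA_base _ _ _ _ _ _ _ _ hb]
      rw [if_neg (show ¬(sp ≠ p.1 ∧ sp ≠ p.2 ∧ sp < 97 + k) from
        fun hcc => absurd hcc.2.2 (by omega))]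
      rw [pvTryRaise, pvTryRaiseLoop_ge _ _ _ _ _ (by omega)]
    · push_neg at hb
      by_cases hskip : sp = p.1 ∨ sp = p.2
      · rw [pvGoA_skip _ _ _ _ _ _ _ _ hb hskip, if_neg (show ¬(sp ≠ p.1 ∧ sp ≠ p.2 ∧ sp < 97 + k)
          from fun hcc => hskip.elim (fun h => hcc.1 h) (fun h => hcc.2.1 h))]
        rw [pvGoA_raise ords k (n - (i+1)) i p.1 p.2 sp path (sp+1) (by omega)]
        rw [pvTryRaise, show n - 1 - i = n - (i+1) by omega]
      · push_neg at hskip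
        rw [pvGoA_hit _ _ _ _ _ _ _ _ hb (by tauto),
          if_pos (show sp ≠ p.1 ∧ sp ≠ p.2 ∧ sp < 97 + k from ⟨hskip.1, hskip.2, hb⟩)]
        simp only [decide_true, Bool.and_true]
        have hrec := pvDfs_limit ords k n (i+1) (path ++ [sp]) (by omega)
        rw [pvPrevs_succ, ← hsp, ← hp] at hrec
        simp only [hrec]
        cases hf : pvFindR ords (97+k) n (i+1) with
        | some t => simp
        | none =>
          rw [pvGoA_raise ords k (n - (i+1)) i p.1 p.2 sp path (sp+1) (by omega)]
          rw [pvTryRaise, show n - 1 - i = n - (i+1) by omega]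
          cases pvTryRaiseLoop (97+k) (n-(i+1)) p.1 p.2 (sp+1) <;> simp
  · have : n - i = 0 := by omega
    rw [this]
    rw [pvFindR, dif_neg hi]
    simp [pvDfsA]
termination_by n - i
decreasing_by omega

lemma pvValidM_spec (ords : List Int) (b : Int) (n : Nat) :
    ∀ (fuel m0 : Nat), n ≤ m0 + fuel → m0 ≤ n → (∀ j, j < m0 → pvVstep ords b j) →
    m0 ≤ pvValidM ords b n fuel m0 ∧ pvValidM ords b n fuel m0 ≤ n ∧
      (∀ j, j < pvValidM ords b n fuel m0 → pvVstep ords b j) ∧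
      (pvValidM ords b n fuel m0 < n → ¬ pvVstep ords b (pvValidM ords b n fuel m0)) := by
  intro fuel
  induction fuel with
  | zero =>
    intro m0 hf hm hv
    have : m0 = n := by omega
    simp only [pvValidM]
    exact ⟨le_rfl, hm, hv, by omega⟩
  | succ f ih =>
    intro m0 hf hm hv
    simp only [pvValidM]
    by_cases hmn : m0 < n
    · rw [if_pos hmn]
      by_cases hbrk : ords.getD m0 0 = (pvPrevs ords m0).1 ∨ ords.getD m0 0 = (pvPrevs ords m0).2 ∨
          b ≤ ords.getD m0 0
      · rw [if_pos hbrk]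
        refine ⟨le_rfl, by omega, hv, fun _ => ?_⟩
        unfold pvVstep
        push_neg
        intro h1 h2
        rcases hbrk with h | h | h
        · exact absurd h h1
        · exact absurd h h2
        · exact h
      · rw [if_neg hbrk]
        push_neg at hbrk
        have := ih (m0+1) (by omega) (by omega) (fun j hj => by
          rcases Nat.lt_succ_iff_lt_or_eq.mp hj with h | h
          · exact hv j h
          · subst h; exact ⟨hbrk.1, hbrk.2.1, by omega⟩)
        exact ⟨by omega, this.2.1, this.2.2.1, this.2.2.2⟩
    · rw [if_neg hmn]
      exact ⟨le_rfl, hm, hv, by omega⟩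

lemma pvFindR_none (ords : List Int) (b : Int) (n m : Nat)
    (hv1 : ∀ j, j < m → pvVstep ords b j) (hv2 : m < n → ¬ pvVstep ords b m)
    (i : Nat) (hinv : ∀ j, j < i → pvVstep ords b j)
    (h : ∀ j, i ≤ j → j < n → j ≤ m → pvTryRaise ords b n j = none) :
    pvFindR ords b n i = none := by
  by_cases hi : i < n
  · have him : i ≤ m := by
      by_contra hcon
      push_neg at hcon
      exact (hv2 (by omega)) (hinv m (by omega))
    rw [pvFindR, dif_pos hi]
    by_cases hv : ords.getD i 0 ≠ (pvPrevs ords i).1 ∧ ords.getD i 0 ≠ (pvPrevs ords i).2 ∧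
        ords.getD i 0 < b
    · rw [if_pos hv]
      rw [pvFindR_none ords b n m hv1 hv2 (i+1)
        (fun j hj => by
          rcases Nat.lt_succ_iff_lt_or_eq.mp hj with hc | hc
          · exact hinv j hc
          · subst hc; exact hv)
        (fun j h1 h2 h3 => h j (by omega) h2 h3)]
      exact h i le_rfl hi him
    · rw [if_neg hv]
      exact h i le_rfl hi him
  · rw [pvFindR, dif_neg hi]
termination_by n - i
decreasing_by omega

lemma pvFindR_some (ords : List Int) (b : Int) (n m : Nat) (hn : n = ords.length)
    (hv1 : ∀ j, j < m → pvVstep ords b j) (hv2 : m < n → ¬ pvVstep ords b m)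
    (i j : Nat) (t : List Int) (hij : i ≤ j) (hjn : j < n) (hjm : j ≤ m)
    (ht : pvTryRaise ords b n j = some t)
    (hmax : ∀ j', j < j' → j' < n → j' ≤ m → pvTryRaise ords b n j' = none) :
    pvFindR ords b n i = some ((ords.drop i).take (j - i) ++ t) := by
  rcases Nat.eq_or_lt_of_le hij with rfl | hlt
  · rw [pvFindR, dif_pos hjn]
    have hdeep : (if ords.getD i 0 ≠ (pvPrevs ords i).1 ∧ ords.getD i 0 ≠ (pvPrevs ords i).2 ∧
        ords.getD i 0 < b then pvFindR ords b n (i+1) else none) = none := by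
      split_ifs with hv
      · exact pvFindR_none ords b n m hv1 hv2 (i+1)
          (fun j' hj' => by
            rcases Nat.lt_succ_iff_lt_or_eq.mp hj' with hc | hc
            · exact hv1 j' (by omega)
            · subst hc; exact hv)
          (fun j' h1 h2 h3 => hmax j' (by omega) h2 h3)
      · rfl
    rw [hdeep]
    simpa using ht
  · have hvi : pvVstep ords b i := hv1 i (by omega)
    unfold pvVstep at hvi
    rw [pvFindR, dif_pos (by omega)]
    rw [if_pos hvi]
    rw [pvFindR_some ords b n m hn hv1 hv2 (i+1) j t (by omega) hjn hjm ht hmax]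
    have hilen : i < ords.length := by omega
    rw [List.drop_eq_getElem_cons hilen]
    have h1 : j - i = (j - (i+1)) + 1 := by omega
    rw [h1, List.take_succ_cons]
    simp [List.getD_eq_getElem?_getD, List.getElem?_eq_getElem hilen]
termination_by j - i
decreasing_by omega

lemma pvOuter_none (s : String) (ords : List Int) (b : Int) (n : Nat) :
    ∀ (i : Nat), (∀ j, j ≤ i → pvTryRaise ords b n j = none) →
    pvOuter s ords b n i = "" := by
  intro i
  induction i with
  | zero => intro h; simp [pvOuter, h 0 le_rfl]
  | succ i ih =>
    intro h
    simp only [pvOuter, h (i+1) le_rfl]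
    exact ih (fun j hj => h j (by omega))

lemma pvOuter_some (s : String) (ords : List Int) (b : Int) (n : Nat) :
    ∀ (i j : Nat) (t : List Int), j ≤ i → pvTryRaise ords b n j = some t →
      (∀ j', j < j' → j' ≤ i → pvTryRaise ords b n j' = none) →
      pvOuter s ords b n i = pvAnswer s j t := by
  intro i
  induction i with
  | zero =>
    intro j t hj ht _
    have : j = 0 := by omega
    subst this
    simp [pvOuter, ht]
  | succ i ih =>
    intro j t hj ht hmax
    by_cases hji : j = i + 1
    · subst hji
      simp [pvOuter, ht]
    · have : pvTryRaise ords b n (i+1) = none := hmax (i+1) (by omega) le_rfl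
      simp only [pvOuter, this]
      exact ih j t (by omega) ht (fun j' h1 h2 => hmax j' h1 (by omega))

lemma pvMain_eq (s : String) (k : Int) :
    smallestBeautifulString2 s k = smallestBeautifulString2_alt s k := by
  simp only [smallestBeautifulString2, smallestBeautifulString2_alt]
  set ords := s.toList.map (fun c => (c.toNat : Int)) with hords
  by_cases hn0 : ords.length = 0
  · rw [if_pos hn0]
    have hA := pvDfs_limit ords k ords.length 0 [] (Nat.zero_le _)
    rw [pvFindR, dif_neg (by omega)] at hA
    rw [show pvPrevs ords 0 = (0, -1) from rfl] at hA
    simp only [Nat.sub_zero] at hA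
    rw [hA]
    rfl
  · rw [if_neg hn0]
    have hvm := pvValidM_spec ords (97+k) ords.length ords.length 0 (by omega) (Nat.zero_le _)
      (fun j hj => absurd hj (Nat.not_lt_zero j))
    set m := pvValidM ords (97+k) ords.length ords.length 0 with hm
    obtain ⟨-, hmn, hv1, hv2⟩ := hvm
    set hi := min m (ords.length - 1) with hhi
    have hA := pvDfs_limit ords k ords.length 0 [] (Nat.zero_le _)
    rw [show pvPrevs ords 0 = (0, -1) from rfl] at hA
    simp only [Nat.sub_zero] at hA
    by_cases hall : ∀ j, j ≤ hi → pvTryRaise ords (97+k) ords.length j = none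
    · have hnone := pvFindR_none ords (97+k) ords.length m hv1 hv2 0
        (fun j hj => absurd hj (Nat.not_lt_zero j))
        (fun j h1 h2 h3 => hall j (by omega))
      rw [hnone] at hA
      rw [hA, pvOuter_none s ords (97+k) ords.length hi hall]
      rfl
    · push_neg at hall
      obtain ⟨j0, hj0le, hj0⟩ := hall
      have hPjm :=
        Nat.findGreatest_spec (P := fun j => pvTryRaise ords (97+k) ords.length j ≠ none)
          (n := hi) hj0le hj0
      set jm := Nat.findGreatest (fun j => pvTryRaise ords (97+k) ords.length j ≠ none) hi
        with hjm
      have hjmle : jm ≤ hi := Nat.findGreatest_le hi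
      have hmax : ∀ j', jm < j' → j' ≤ hi → pvTryRaise ords (97+k) ords.length j' = none := by
        intro j' h1 h2
        have := Nat.findGreatest_is_greatest
          (P := fun j => pvTryRaise ords (97+k) ords.length j ≠ none) (n := hi) h1 h2
        simpa using this
      obtain ⟨t, ht⟩ : ∃ t, pvTryRaise ords (97+k) ords.length jm = some t := by
        cases hx : pvTryRaise ords (97+k) ords.length jm
        · exact absurd hx hPjm
        · exact ⟨_, rfl⟩
      have hsome := pvFindR_some ords (97+k) ords.length m rfl hv1 hv2 0 jm t
        (Nat.zero_le _) (by omega) (by omega) ht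
        (fun j' h1 h2 h3 => hmax j' h1 (by omega))
      rw [hsome] at hA
      rw [hA, pvOuter_some s ords (97+k) ords.length hi jm t hjmle ht hmax]
      simp only [List.drop_zero, Nat.sub_zero, pvAnswer, List.map_append, List.nil_append]
      congr 1
      rw [hords, List.map_take, List.map_map]
      simp [Function.comp_def, Char.ofNat_toNat]

-- ===== VERDICT (by name: the statement is the Claim_ definition above) =====
theorem smallestBeautifulString2_spec : Claim_equal_smallestBeautifulString2 := by
  unfold Claim_equal_smallestBeautifulString2
  intro s k _
  unfold Spec_smallestBeautifulString2
  exact pvMain_eq s k
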